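-- pv_equiv track=rewrite | github.com/Armanisra/python | das.py | let_count
-- ===== SOURCE A (Python) =====
-- def let_count(mstr):
--     a = {}
--     for i in mstr:
--         if i.isalpha():
--             if i in a:
--                 a[i] += 1
--             else:
--                 a[i] = 1
--
--     ml = list(a.items())
--     ml.sort(key=lambda x : x[1])
--
--     return ml[0], ml[-1]
-- ===== SOURCE B (Python) =====
-- def let_count(mstr):
--     a = {}
--     for i in mstr:
--         if i.isalpha():
--             if i in a:
--                 a[i] += 1
--             else:
--                 a[i] = 1
--     ml = list(a.items())
--     best_min = best_max = ml[0]
--     for item in ml[1:]: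
--         if item[1] < best_min[1]:
--             best_min = item
--         if item[1] >= best_max[1]:
--             best_max = item
--     return best_min, best_max
-- ===== Notes on version B (the rewrite author's own statement) =====
-- stated objective: alternative
-- what changed: B keeps the same counting dict but replaces sorting the items by count with a single linear scan that tracks the first minimal and last maximal item, matching the stable sort's tie-breaking.
import Mathlib
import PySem

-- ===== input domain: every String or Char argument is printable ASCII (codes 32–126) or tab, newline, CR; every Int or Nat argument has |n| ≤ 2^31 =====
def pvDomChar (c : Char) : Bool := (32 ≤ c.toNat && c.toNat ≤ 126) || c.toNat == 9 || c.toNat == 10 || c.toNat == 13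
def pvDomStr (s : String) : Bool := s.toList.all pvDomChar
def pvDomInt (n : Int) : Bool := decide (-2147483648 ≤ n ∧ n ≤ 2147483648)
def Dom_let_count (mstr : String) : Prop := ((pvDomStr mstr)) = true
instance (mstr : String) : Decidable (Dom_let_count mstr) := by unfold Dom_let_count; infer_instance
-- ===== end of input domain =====

-- B replaces the sort-by-count of the items list with one linear scan keeping the
-- first minimal and last maximal item (the stable sort's tie-breaking); same counting loop.


-- ===== PORT A =====
-- the counting loop, identical in A and in B (both Pythons build dict `a` the same way)
def pvCount (mstr : String) : PySem.Dict String Int :=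
  mstr.toList.foldl (fun a i =>
    if PySem.Chars.isalpha i then
      if a.contains (String.ofList [i]) then
        a.insert (String.ofList [i]) (a.getD (String.ofList [i]) 0 + 1)   -- a[i] += 1
      else
        a.insert (String.ofList [i]) 1                                -- a[i] = 1
    else a) PySem.Dict.empty

def let_count (mstr : String) : (String × Int) × (String × Int) :=
  let ml := PySem.List.sorted (pvCount mstr).items (fun x => x.2) false
  (PySem.List.pyGetD ml 0 ("", 0), PySem.List.pyGetD ml (-1) ("", 0))

-- ===== PORT B =====
def let_count_alt (mstr : String) : (String × Int) × (String × Int) :=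
  let ml := (pvCount mstr).items
  let b0 := PySem.List.pyGetD ml 0 ("", 0)
  (PySem.List.slice ml (some 1) none).foldl
    (fun (b : (String × Int) × (String × Int)) item =>
      (if item.2 < b.1.2 then item else b.1,
       if item.2 ≥ b.2.2 then item else b.2)) (b0, b0)

-- ===== PRECONDITION & SPEC =====
-- Pre_ excludes exactly the strings with no alphabetic character: there A's ml[0] raises IndexError.
def Pre_let_count (mstr : String) : Prop := mstr.toList.any PySem.Chars.isalpha = true
instance (mstr : String) : Decidable (Pre_let_count mstr) := by unfold Pre_let_count; infer_instance

def pvWitness_let_count : String := "ab"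

def Spec_let_count (mstr : String) (out : (String × Int) × (String × Int)) : Prop := out = let_count_alt mstr
instance (mstr : String) (out : (String × Int) × (String × Int)) : Decidable (Spec_let_count mstr out) := by unfold Spec_let_count; infer_instance

-- ===== CLAIM (what is proved, stated in full; the proofs are below) =====
def Claim_equal_let_count : Prop := ∀ (mstr : String), Dom_let_count mstr → Pre_let_count mstr → Spec_let_count mstr (let_count mstr)

-- ===== LEMMAS AND PROOFS =====

-- the dict's contains is monotone through the counting loop
theorem pv_contains_mono (l : List Char) (d : PySem.Dict String Int) (k : String)
    (h : d.contains k = true) :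
    (l.foldl (fun a i =>
      if PySem.Chars.isalpha i then
        if a.contains (String.ofList [i]) then
          a.insert (String.ofList [i]) (a.getD (String.ofList [i]) 0 + 1)
        else a.insert (String.ofList [i]) 1
      else a) d).contains k = true := by
  induction l generalizing d with
  | nil => exact h
  | cons x xs ih =>
    simp only [List.foldl_cons]
    apply ih
    split_ifs <;> simp [PySem.Dict.contains_insert, h]

theorem pv_contains_of_mem (l : List Char) (d : PySem.Dict String Int) (c : Char)
    (hc : c ∈ l) (ha : PySem.Chars.isalpha c = true) :
    (l.foldl (fun a i =>
      if PySem.Chars.isalpha i then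
        if a.contains (String.ofList [i]) then
          a.insert (String.ofList [i]) (a.getD (String.ofList [i]) 0 + 1)
        else a.insert (String.ofList [i]) 1
      else a) d).contains (String.ofList [c]) = true := by
  induction l generalizing d with
  | nil => cases hc
  | cons x xs ih =>
    simp only [List.foldl_cons]
    rcases List.mem_cons.mp hc with rfl | hmem
    · apply pv_contains_mono
      split_ifs <;> simp_all
    · exact ih _ hmem

theorem pv_items_ne_nil (mstr : String) (h : Pre_let_count mstr) :
    (pvCount mstr).items ≠ [] := by
  unfold Pre_let_count at h
  rcases List.any_eq_true.mp h with ⟨c, hc, ha⟩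
  intro hnil
  have hcont := pv_contains_of_mem mstr.toList PySem.Dict.empty c hc ha
  have hcont' : (pvCount mstr).contains (String.ofList [c]) = true := hcont
  have hd : pvCount mstr = PySem.Dict.empty := by
    apply PySem.Dict.ext
    simpa [PySem.Dict.empty] using hnil
  rw [hd] at hcont'
  simp [PySem.Dict.contains_empty] at hcont'

-- insertBy never produces the empty list
theorem pv_insertBy_ne_nil {α : Type} (bef : α → α → Bool) (x : α) (ys : List α) :
    PySem.List.insertBy bef x ys ≠ [] := by
  cases ys with
  | nil => simp [PySem.List.insertBy]
  | cons y t => simp only [PySem.List.insertBy]; split_ifs <;> simp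

-- one step of insertBy
theorem pv_insertBy_cons {α : Type} (bef : α → α → Bool) (x y : α) (t : List α) :
    PySem.List.insertBy bef x (y :: t) =
      if bef x y then x :: y :: t else y :: PySem.List.insertBy bef x t := rfl

-- head of insertBy into a nonempty list
theorem pv_head?_insertBy (x y : String × Int) (t : List (String × Int)) :
    (PySem.List.insertBy (fun a b => decide (a.2 < b.2)) x (y :: t)).head? =
      some (if x.2 < y.2 then x else y) := by
  rw [pv_insertBy_cons]
  split_ifs with h1 h2 <;> simp_all

-- getLast? of a cons with a nonempty tail
theorem pv_getLast?_cons_ne {α : Type} (a : α) (l : List α) (h : l ≠ []) :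
    (a :: l).getLast? = l.getLast? := by
  cases l with
  | nil => exact absurd rfl h
  | cons b t => rw [List.getLast?_cons_cons]

-- last of insertBy into a key-sorted nonempty list
theorem pv_getLast?_insertBy (ys : List (String × Int)) (x M : String × Int)
    (hp : ys.Pairwise (fun a b => a.2 ≤ b.2)) (hl : ys.getLast? = some M) :
    (PySem.List.insertBy (fun a b => decide (a.2 < b.2)) x ys).getLast? =
      some (if x.2 < M.2 then M else x) := by
  induction ys with
  | nil => simp at hl
  | cons y t ih =>
    have hyM : y.2 ≤ M.2 := by
      rcases List.mem_cons.mp (List.mem_of_getLast? hl) with rfl | hm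
      · exact le_refl _
      · exact (List.pairwise_cons.mp hp).1 M hm
    rw [pv_insertBy_cons]
    by_cases hb : x.2 < y.2
    · rw [if_pos (by simpa using hb)]
      have hxM : x.2 < M.2 := lt_of_lt_of_le hb hyM
      cases t with
      | nil =>
        simp only [List.getLast?_singleton, Option.some.injEq] at hl
        subst hl; simp [hxM]
      | cons z s =>
        rw [List.getLast?_cons_cons, hl, if_pos hxM]
    · rw [if_neg (by simpa using hb)]
      cases t with
      | nil =>
        simp only [List.getLast?_singleton, Option.some.injEq] at hl
        subst hl
        simp [PySem.List.insertBy, hb]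
      | cons z s =>
        have hl' : (z :: s).getLast? = some M := by
          simpa [List.getLast?_cons_cons] using hl
        rw [pv_getLast?_cons_ne _ _ (pv_insertBy_ne_nil (fun a b => decide (a.2 < b.2)) x (z :: s))]
        exact ih (List.pairwise_cons.mp hp).2 hl'

-- B's pair fold computes the two single folds
theorem pv_pair_fold (t : List (String × Int)) (p q : String × Int) :
    t.foldl (fun (b : (String × Int) × (String × Int)) item =>
        (if item.2 < b.1.2 then item else b.1,
         if item.2 ≥ b.2.2 then item else b.2)) (p, q) =
      (t.foldl (fun b item => if item.2 < b.2 then item else b) p,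
       t.foldl (fun b item => if item.2 ≥ b.2 then item else b) q) := by
  induction t generalizing p q with
  | nil => rfl
  | cons x xs ih => simp only [List.foldl_cons, ih]

-- head of the stable sort = first minimal element = B's min fold
theorem pv_sorted_head? (t : List (String × Int)) (h : String × Int) :
    (PySem.List.sorted (h :: t) (fun x => x.2) false).head? =
      some (t.foldl (fun b item => if item.2 < b.2 then item else b) h) := by
  induction t using List.reverseRecOn with
  | nil => simp [PySem.List.sorted_eq_foldl_insertBy, PySem.List.insertBy]
  | append_singleton t' x ih =>
    have hsplit : h :: (t' ++ [x]) = (h :: t') ++ [x] := by simp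
    rw [hsplit, PySem.List.sorted_eq_foldl_insertBy, List.foldl_append,
        ← PySem.List.sorted_eq_foldl_insertBy]
    rcases hs : PySem.List.sorted (h :: t') (fun x => x.2) false with _ | ⟨m, rest⟩
    · exact absurd ((PySem.List.sorted_eq_nil_iff _ _ _).mp hs) (by simp)
    · rw [hs] at ih
      simp only [List.head?_cons, Option.some.injEq] at ih
      simp only [List.foldl_cons, List.foldl_append, List.foldl_nil, ← ih]
      exact pv_head?_insertBy x m rest

-- last of the stable sort = last maximal element = B's max fold
theorem pv_sorted_getLast? (t : List (String × Int)) (h : String × Int) :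
    (PySem.List.sorted (h :: t) (fun x => x.2) false).getLast? =
      some (t.foldl (fun b item => if item.2 ≥ b.2 then item else b) h) := by
  induction t using List.reverseRecOn with
  | nil => simp [PySem.List.sorted_eq_foldl_insertBy, PySem.List.insertBy]
  | append_singleton t' x ih =>
    have hsplit : h :: (t' ++ [x]) = (h :: t') ++ [x] := by simp
    rw [hsplit, PySem.List.sorted_eq_foldl_insertBy, List.foldl_append,
        ← PySem.List.sorted_eq_foldl_insertBy]
    simp only [List.foldl_cons, List.foldl_nil]
    have hp := PySem.List.sorted_pairwise (h :: t') (fun x => x.2)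
    rw [pv_getLast?_insertBy _ x _ hp ih]
    rw [List.foldl_append, List.foldl_cons, List.foldl_nil]
    congr 1
    by_cases hx : x.2 < (t'.foldl (fun b item => if item.2 ≥ b.2 then item else b) h).2
    · rw [if_pos hx, if_neg (by omega)]
    · rw [if_neg hx, if_pos (by omega)]

-- ===== VERDICT (by name: the statement is the Claim_ definition above) =====
theorem let_count_spec : Claim_equal_let_count := by
  intro mstr _ hpre
  unfold Spec_let_count let_count let_count_alt
  rcases hml : (pvCount mstr).items with _ | ⟨h, t⟩
  · exact absurd hml (pv_items_ne_nil mstr hpre)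
  · have hslice : PySem.List.slice (h :: t) (some 1) none = t := by
      have := PySem.List.slice_from_natCast (h :: t) 1
      simpa using this
    simp only [hslice, PySem.List.pyGetD_zero_cons, pv_pair_fold]
    have hhd := pv_sorted_head? t h
    have hlast := pv_sorted_getLast? t h
    rcases hs : PySem.List.sorted (h :: t) (fun x => x.2) false with _ | ⟨m, rest⟩
    · exact absurd ((PySem.List.sorted_eq_nil_iff _ _ _).mp hs) (by simp)
    · rw [hs] at hhd hlast
      have h1 : m = t.foldl (fun b item => if item.2 < b.2 then item else b) h := by
        simpa using hhd
      rw [PySem.List.pyGetD_neg_one _ _ (List.cons_ne_nil m rest)]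
      rw [List.getLast?_eq_some_getLast (List.cons_ne_nil m rest)] at hlast
      have h2 := Option.some.inj hlast
      simp [PySem.List.pyGetD_zero_cons, ← h1, h2]
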